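-- pv_equiv track=rewrite | github.com/XeroXer/advent_of_code_2016 | xeroxer-python3/day02/part1.py | handle_directions
-- ===== SOURCE A (Python) =====
-- def handle_directions(directions):
--     """Handle input directions"""
--     keypad = {
--         0: {0: '1', 1: '2', 2: '3'},
--         1: {0: '4', 1: '5', 2: '6'},
--         2: {0: '7', 1: '8', 2: '9'},
--     }
--     xpos = ypos = 0
--     passphrase = ''
--     for line in directions:
--         for direction in line:
--             if direction == 'L':
--                 xposn = xpos - 1
--                 xpos = xposn if xposn in keypad[ypos] else xpos
--             elif direction == 'R':
--                 xposn = xpos + 1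
--                 xpos = xposn if xposn in keypad[ypos] else xpos
--             elif direction == 'U':
--                 yposn = ypos - 1
--                 ypos = yposn if yposn in keypad and xpos in keypad[yposn] else ypos
--             elif direction == 'D':
--                 yposn = ypos + 1
--                 ypos = yposn if yposn in keypad and xpos in keypad[yposn] else ypos
--         passphrase += str(keypad[ypos][xpos])
--     return passphrase
-- ===== SOURCE B (Python) =====
-- def handle_directions(directions):
--     """Handle input directions"""
--     # Instead of simulating one position, compose each line's moves into a
--     # transition table on {0,1,2} (x and y axes are independent), then apply
--     # the whole-line map to the current coordinate.
--     STEP = {'L': (0, 0, 1), 'R': (1, 2, 2), 'U': (0, 0, 1), 'D': (1, 2, 2)}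
--     x = y = 0
--     out = []
--     for line in directions:
--         fx = fy = (0, 1, 2)
--         for c in line:
--             if c in ('L', 'R'):
--                 t = STEP[c]
--                 fx = (t[fx[0]], t[fx[1]], t[fx[2]])
--             elif c in ('U', 'D'):
--                 t = STEP[c]
--                 fy = (t[fy[0]], t[fy[1]], t[fy[2]])
--         x, y = fx[x], fy[y]
--         out.append('123456789'[3 * y + x])
--     return ''.join(out)
-- ===== Notes on version B (the rewrite author's own statement) =====
-- stated objective: alternative
-- what changed: Instead of simulating a single (x,y) position through A's nested keypad dict, B composes each line's moves into a transition table on {0,1,2} per independent axis (function composition on all three states at once) and then applies the whole-line map to the current coordinate, reading the digit off '123456789'.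
import Mathlib
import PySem

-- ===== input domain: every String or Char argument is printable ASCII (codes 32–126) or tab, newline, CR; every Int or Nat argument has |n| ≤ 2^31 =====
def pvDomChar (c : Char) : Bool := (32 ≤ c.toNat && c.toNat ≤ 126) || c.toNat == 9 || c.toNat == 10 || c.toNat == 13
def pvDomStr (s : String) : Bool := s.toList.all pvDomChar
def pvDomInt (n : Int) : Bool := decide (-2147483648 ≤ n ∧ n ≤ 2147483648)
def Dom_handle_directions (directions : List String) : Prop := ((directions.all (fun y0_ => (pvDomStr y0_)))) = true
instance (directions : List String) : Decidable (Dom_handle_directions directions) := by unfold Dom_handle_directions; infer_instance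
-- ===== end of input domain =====

-- B drops A's single-position simulation over the nested keypad dict: it composes each
-- line's moves into per-axis transition tables on {0,1,2} and applies the whole-line map
-- (objective: alternative).

-- ===== PORT A =====
-- the literal keypad dict of A
def pvKeypad : PySem.Dict Int (PySem.Dict Int String) :=
  PySem.Dict.ofList
    [ (0, PySem.Dict.ofList [(0, "1"), (1, "2"), (2, "3")])
    , (1, PySem.Dict.ofList [(0, "4"), (1, "5"), (2, "6")])
    , (2, PySem.Dict.ofList [(0, "7"), (1, "8"), (2, "9")]) ]

-- keypad[ypos] : A only evaluates this at ypos ∈ {0,1,2}, where the lookup succeeds; getD Dict.empty is exact there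
def pvRow (y : Int) : PySem.Dict Int String := (pvKeypad.get? y).getD PySem.Dict.empty

-- one character of A's inner loop, state (xpos, ypos)
def pvStepA (p : Int × Int) (c : Char) : Int × Int :=
  let (xpos, ypos) := p
  if c = 'L' then
    let xposn := xpos - 1
    ((if (pvRow ypos).contains xposn then xposn else xpos), ypos)
  else if c = 'R' then
    let xposn := xpos + 1
    ((if (pvRow ypos).contains xposn then xposn else xpos), ypos)
  else if c = 'U' then
    let yposn := ypos - 1
    (xpos, (if pvKeypad.contains yposn && (pvRow yposn).contains xpos then yposn else ypos))
  else if c = 'D' then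
    let yposn := ypos + 1
    (xpos, (if pvKeypad.contains yposn && (pvRow yposn).contains xpos then yposn else ypos))
  else p

def handle_directions (directions : List String) : String :=
  (directions.foldl
    (fun (st : String × Int × Int) line =>
      let (passphrase, xpos, ypos) := st
      let (xpos', ypos') := line.toList.foldl pvStepA (xpos, ypos)
      (passphrase ++ (pvRow ypos').getD xpos' "", xpos', ypos'))
    ("", 0, 0)).1

-- ===== PORT B =====
-- t[i] for a Python 3-tuple t and an index i that B only produces in {0,1,2}
def pvApply (t : Nat × Nat × Nat) (i : Nat) : Nat :=
  match i with
  | 0 => t.1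
  | 1 => t.2.1
  | _ => t.2.2

-- STEP[c] for c ∈ 'LRUD' (B looks it up only after the membership test succeeds)
def pvStepTab (c : Char) : Nat × Nat × Nat :=
  if c = 'L' ∨ c = 'U' then (0, 0, 1) else (1, 2, 2)

-- one character of B's inner loop, state (fx, fy) : the two per-axis transition tables
def pvLineStep (fp : (Nat × Nat × Nat) × (Nat × Nat × Nat)) (c : Char) :
    (Nat × Nat × Nat) × (Nat × Nat × Nat) :=
  let (fx, fy) := fp
  if c = 'L' ∨ c = 'R' then
    let t := pvStepTab c
    ((pvApply t fx.1, pvApply t fx.2.1, pvApply t fx.2.2), fy)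
  else if c = 'U' ∨ c = 'D' then
    let t := pvStepTab c
    (fx, (pvApply t fy.1, pvApply t fy.2.1, pvApply t fy.2.2))
  else fp

-- '123456789'[i] : B only produces i = 3*y+x ≤ 8, where indexing succeeds; getD "" is exact there
def pvDigit (i : Nat) : String :=
  ((PySem.Str.pyGet? "123456789" (i : Int)).map String.singleton).getD ""

def handle_directions_alt (directions : List String) : String :=
  PySem.Str.join ""
    ((directions.foldl
      (fun (st : List String × Nat × Nat) line =>
        let (out, x, y) := st
        let (fx, fy) := line.toList.foldl pvLineStep ((0, 1, 2), (0, 1, 2))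
        let x' := pvApply fx x
        let y' := pvApply fy y
        (out ++ [pvDigit (3 * y' + x')], x', y'))
      ([], 0, 0)).1)

-- ===== PRECONDITION & SPEC =====
def Spec_handle_directions (directions : List String) (out : String) : Prop := out = handle_directions_alt directions
instance (directions : List String) (out : String) : Decidable (Spec_handle_directions directions out) := by unfold Spec_handle_directions; infer_instance

-- ===== CLAIM (what is proved, stated in full; the proofs are below) =====
def Claim_equal_handle_directions : Prop := ∀ (directions : List String), Dom_handle_directions directions → Spec_handle_directions directions (handle_directions directions)

-- ===== LEMMAS AND PROOFS =====
-- proof-only: the direct one-character step on Nat coordinates that B's table composition realises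
def pvStepN (p : Nat × Nat) (c : Char) : Nat × Nat :=
  if c = 'L' ∨ c = 'R' then (pvApply (pvStepTab c) p.1, p.2)
  else if c = 'U' ∨ c = 'D' then (p.1, pvApply (pvStepTab c) p.2)
  else p

-- the identity table fixes an in-grid coordinate
theorem pvApply_id (i : Nat) (h : i < 3) : pvApply (0, 1, 2) i = i := by
  interval_cases i <;> rfl

-- empty-separator join is concatenation
theorem pvJoin_nil_flatten (ls : List (List Char)) : PySem.Chars.join [] ls = ls.flatten := by
  induction ls with
  | nil => simp [PySem.Chars.join_nil]
  | cons a ls ih =>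
    cases ls with
    | nil => simp [PySem.Chars.join_singleton]
    | cons b t => simpa [PySem.Chars.join_cons_cons] using ih

-- composing a character into the tables commutes with applying them
theorem pvApply_comp (t f : Nat × Nat × Nat) (i : Nat) :
    pvApply (pvApply t f.1, pvApply t f.2.1, pvApply t f.2.2) i = pvApply t (pvApply f i) := by
  rcases i with _ | _ | i <;> rfl

-- applying the folded tables = folding the direct step
theorem pvFoldTab (cs : List Char) (fx fy : Nat × Nat × Nat) (x y : Nat) :
    (pvApply (cs.foldl pvLineStep (fx, fy)).1 x, pvApply (cs.foldl pvLineStep (fx, fy)).2 y)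
      = cs.foldl pvStepN (pvApply fx x, pvApply fy y) := by
  induction cs generalizing fx fy with
  | nil => rfl
  | cons c cs ih =>
    simp only [List.foldl_cons]
    by_cases hx : c = 'L' ∨ c = 'R'
    · simpa [pvLineStep, pvStepN, hx, pvApply_comp] using
        ih (pvApply (pvStepTab c) fx.1, pvApply (pvStepTab c) fx.2.1, pvApply (pvStepTab c) fx.2.2) fy
    · by_cases hy : c = 'U' ∨ c = 'D'
      · simpa [pvLineStep, pvStepN, hx, hy, pvApply_comp] using
          ih fx (pvApply (pvStepTab c) fy.1, pvApply (pvStepTab c) fy.2.1, pvApply (pvStepTab c) fy.2.2)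
      · simpa [pvLineStep, pvStepN, hx, hy] using ih fx fy

-- A's step on an in-grid state equals the Nat step (cast), and the grid is preserved
theorem pvStepAN (x y : Nat) (hx : x < 3) (hy : y < 3) (c : Char) :
    pvStepA ((x : Int), (y : Int)) c
        = (((pvStepN (x, y) c).1 : Int), ((pvStepN (x, y) c).2 : Int))
      ∧ (pvStepN (x, y) c).1 < 3 ∧ (pvStepN (x, y) c).2 < 3 := by
  interval_cases x <;> interval_cases y <;>
    by_cases hL : c = 'L' <;> by_cases hR : c = 'R' <;>
    by_cases hU : c = 'U' <;> by_cases hD : c = 'D' <;>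
    simp [pvStepA, pvStepN, pvStepTab, pvApply, hL, hR, hU, hD] <;> decide

theorem pvFoldAN (cs : List Char) (x y : Nat) (hx : x < 3) (hy : y < 3) :
    cs.foldl pvStepA ((x : Int), (y : Int))
        = (((cs.foldl pvStepN (x, y)).1 : Int), ((cs.foldl pvStepN (x, y)).2 : Int))
      ∧ (cs.foldl pvStepN (x, y)).1 < 3 ∧ (cs.foldl pvStepN (x, y)).2 < 3 := by
  induction cs generalizing x y with
  | nil => exact ⟨rfl, hx, hy⟩
  | cons c cs ih =>
    obtain ⟨he, h1, h2⟩ := pvStepAN x y hx hy c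
    rcases hp : pvStepN (x, y) c with ⟨x', y'⟩
    rw [hp] at he h1 h2
    simpa [List.foldl_cons, he, hp] using ih x' y' h1 h2

-- A's digit lookup = B's digit at the same in-grid position
theorem pvDigit_eq (x y : Nat) (hx : x < 3) (hy : y < 3) :
    (pvRow (y : Int)).getD (x : Int) "" = pvDigit (3 * y + x) := by
  interval_cases x <;> interval_cases y <;> decide

-- the two outer folds agree, coupled by pass = join of out and cast positions
theorem pvOuter (dirs : List String) (pass : List String) (x y : Nat) (hx : x < 3) (hy : y < 3) :
    (dirs.foldl
      (fun (st : String × Int × Int) line =>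
        let (passphrase, xpos, ypos) := st
        let (xpos', ypos') := line.toList.foldl pvStepA (xpos, ypos)
        (passphrase ++ (pvRow ypos').getD xpos' "", xpos', ypos'))
      (PySem.Str.join "" pass, (x : Int), (y : Int))).1
    = PySem.Str.join ""
      ((dirs.foldl
        (fun (st : List String × Nat × Nat) line =>
          let (out, x, y) := st
          let (fx, fy) := line.toList.foldl pvLineStep ((0, 1, 2), (0, 1, 2))
          let x' := pvApply fx x
          let y' := pvApply fy y
          (out ++ [pvDigit (3 * y' + x')], x', y'))
        (pass, x, y)).1) := by
  induction dirs generalizing pass x y with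
  | nil => rfl
  | cons line rest ih =>
    obtain ⟨he, h1, h2⟩ := pvFoldAN line.toList x y hx hy
    have htab := pvFoldTab line.toList (0, 1, 2) (0, 1, 2) x y
    have happ : (pvApply (line.toList.foldl pvLineStep ((0,1,2),(0,1,2))).1 x,
                 pvApply (line.toList.foldl pvLineStep ((0,1,2),(0,1,2))).2 y)
        = line.toList.foldl pvStepN (x, y) := by
      rw [pvApply_id x hx, pvApply_id y hy] at htab; exact htab
    rcases hp : line.toList.foldl pvStepN (x, y) with ⟨x', y'⟩
    rw [hp] at he h1 h2 happ
    have hx' : pvApply (line.toList.foldl pvLineStep ((0,1,2),(0,1,2))).1 x = x' :=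
      congrArg Prod.fst happ
    have hy' : pvApply (line.toList.foldl pvLineStep ((0,1,2),(0,1,2))).2 y = y' :=
      congrArg Prod.snd happ
    have hjoin : PySem.Str.join "" pass ++ pvDigit (3 * y' + x')
        = PySem.Str.join "" (pass ++ [pvDigit (3 * y' + x')]) := by
      simp [PySem.Str.join, pvJoin_nil_flatten, String.ofList_append, String.ofList_toList]
    simp only [List.foldl_cons, he]
    rcases hq : line.toList.foldl pvLineStep ((0,1,2),(0,1,2)) with ⟨fx, fy⟩
    rw [hq] at hx' hy'
    simp only [hx', hy', pvDigit_eq x' y' h1 h2, hjoin]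
    exact ih (pass ++ [pvDigit (3 * y' + x')]) x' y' h1 h2

-- ===== VERDICT (by name: the statement is the Claim_ definition above) =====
theorem handle_directions_spec : Claim_equal_handle_directions := by
  intro directions _
  unfold Spec_handle_directions handle_directions handle_directions_alt
  have h := pvOuter directions [] 0 0 (by norm_num) (by norm_num)
  simpa using h
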